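-- pv_equiv track=rewrite | github.com/KingArthur-cyber/rosalind_sols | 2sum.py | min_finder
-- ===== SOURCE A (Python) =====
-- def min_finder(answer):
--
--     if len(answer) > 1:
--         temp = []
--         for i in range(0,len(answer)):
--             temp.append(answer[i][1])
--         min_y = min(temp)
--         for i in range(0,len(answer)):
--             if min_y == answer[i][1]:
--                 return answer[i]
--     else:
--         return [-1]
-- ===== SOURCE B (Python) =====
-- def min_finder(answer):
--     if len(answer) > 1:
--         best = answer[0]
--         for row in answer[1:]:
--             if row[1] < best[1]:
--                 best = row
--         return best
--     else:
--         return [-1]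
-- ===== Notes on version B (the rewrite author's own statement) =====
-- stated objective: simpler
-- what changed: Replaces A's three passes (build a list of second coordinates, take its min, rescan for the first row matching it) by a single running-best fold that keeps the first row with the smallest second coordinate.
import Mathlib
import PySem

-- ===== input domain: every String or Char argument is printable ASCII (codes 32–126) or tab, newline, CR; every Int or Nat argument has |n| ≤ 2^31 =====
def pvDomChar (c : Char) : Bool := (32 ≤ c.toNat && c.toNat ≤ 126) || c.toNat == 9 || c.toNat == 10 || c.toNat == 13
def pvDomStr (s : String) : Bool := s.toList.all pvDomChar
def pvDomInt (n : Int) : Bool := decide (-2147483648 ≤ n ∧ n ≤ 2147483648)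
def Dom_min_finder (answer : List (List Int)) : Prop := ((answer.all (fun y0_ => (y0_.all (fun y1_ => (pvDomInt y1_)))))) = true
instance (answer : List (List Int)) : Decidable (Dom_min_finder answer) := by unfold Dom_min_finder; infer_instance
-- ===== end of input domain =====

-- B replaces A's three passes (collect second coordinates, min, rescan) by one running-best fold.

-- ===== PORT A =====
-- the early-return rescan 'for i in range(...): if min_y == answer[i][1]: return answer[i]'
def minFinderRescan (m : Int) : List (List Int) → List Int
  | [] => []
  | r :: t => if m == (PySem.List.pyGet? r 1).getD 0 then r else minFinderRescan m t

def min_finder (answer : List (List Int)) : List Int :=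
  if answer.length > 1 then
    let temp := answer.foldl (fun acc row => acc ++ [(PySem.List.pyGet? row 1).getD 0]) []
    let min_y := (PySem.List.min? temp (fun y => y)).getD 0
    minFinderRescan min_y answer
  else [-1]

-- ===== PORT B =====
def min_finder_alt (answer : List (List Int)) : List Int :=
  match answer with
  | r0 :: r1 :: rest =>
      (r1 :: rest).foldl
        (fun best row =>
          if (PySem.List.pyGet? row 1).getD 0 < (PySem.List.pyGet? best 1).getD 0 then row
          else best) r0
  | _ => [-1]

-- ===== PRECONDITION & SPEC =====
-- Pre_ excludes exactly the inputs where the Python A raises IndexError: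
-- when len(answer) > 1, every row must have at least two elements.
def Pre_min_finder (answer : List (List Int)) : Prop :=
  1 < answer.length → ∀ r ∈ answer, 2 ≤ r.length
instance (answer : List (List Int)) : Decidable (Pre_min_finder answer) := by
  unfold Pre_min_finder; infer_instance

def pvWitness_min_finder : List (List Int) := [[1, 2], [3, 1], [5, 1]]

def Spec_min_finder (answer : List (List Int)) (out : List Int) : Prop := out = min_finder_alt answer
instance (answer : List (List Int)) (out : List Int) : Decidable (Spec_min_finder answer out) := by unfold Spec_min_finder; infer_instance

-- ===== CLAIM (what is proved, stated in full; the proofs are below) =====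
def Claim_equal_min_finder : Prop := ∀ (answer : List (List Int)), Dom_min_finder answer → Pre_min_finder answer → Spec_min_finder answer (min_finder answer)

-- ===== LEMMAS AND PROOFS =====

-- the key A and B both look at: row[1] (ported with default 0, irrelevant inside Pre_)
def pvKey (r : List Int) : Int := (PySem.List.pyGet? r 1).getD 0

theorem pvKey_unfold (r : List Int) : (PySem.List.pyGet? r 1).getD 0 = pvKey r := rfl

theorem pvRescan_eq_foldl (t : List (List Int)) :
    ∀ h : List Int,
      minFinderRescan ((t.map pvKey).foldl min (pvKey h)) (h :: t)
        = t.foldl (fun best row => if pvKey row < pvKey best then row else best) h := by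
  induction t with
  | nil => intro h; simp [minFinderRescan, pvKey]
  | cons r t' ih =>
      intro h
      by_cases hlt : pvKey r < pvKey h
      · have hmin : min (pvKey h) (pvKey r) = pvKey r := by omega
        have hle : (t'.map pvKey).foldl min (pvKey r) ≤ pvKey r :=
          (PySem.List.foldl_min_le (t'.map pvKey) (pvKey r)).1
        simp only [List.map_cons, List.foldl_cons, hmin, minFinderRescan, pvKey_unfold,
          beq_iff_eq]
        rw [if_neg (by omega : ¬ (t'.map pvKey).foldl min (pvKey r) = pvKey h),
          if_pos hlt]
        have := ih r
        simpa only [minFinderRescan, pvKey_unfold, beq_iff_eq] using this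
      · have hmin : min (pvKey h) (pvKey r) = pvKey h := by omega
        have hle : (t'.map pvKey).foldl min (pvKey h) ≤ pvKey h :=
          (PySem.List.foldl_min_le (t'.map pvKey) (pvKey h)).1
        have ihh := ih h
        simp only [minFinderRescan, pvKey_unfold, beq_iff_eq] at ihh
        simp only [List.map_cons, List.foldl_cons, hmin, minFinderRescan, pvKey_unfold,
          beq_iff_eq, if_neg hlt]
        by_cases heq : (t'.map pvKey).foldl min (pvKey h) = pvKey h
        · rw [if_pos heq]
          rw [if_pos heq] at ihh
          exact ihh
        · have hlt2 : (t'.map pvKey).foldl min (pvKey h) < pvKey h :=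
            lt_of_le_of_ne hle heq
          rw [if_neg heq]
          rw [if_neg heq] at ihh
          rw [if_neg (by omega : ¬ (t'.map pvKey).foldl min (pvKey h) = pvKey r)]
          exact ihh

-- ===== VERDICT (by name: the statement is the Claim_ definition above) =====
theorem min_finder_spec : Claim_equal_min_finder := by
  intro answer _ _
  unfold Spec_min_finder min_finder min_finder_alt
  match answer with
  | [] => simp
  | [r] => simp
  | r0 :: r1 :: rest =>
      have hlen : (r0 :: r1 :: rest).length > 1 := by simp
      simp only [hlen, if_pos]
      rw [PySem.List.foldl_append_singleton_eq_map]
      simp only [List.nil_append, List.map_cons, pvKey_unfold]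
      rw [show (pvKey r0 :: pvKey r1 :: List.map pvKey rest)
            = pvKey r0 :: (r1 :: rest).map pvKey by simp,
        PySem.List.min?_id_cons]
      simp only [Option.getD_some]
      simpa only [pvKey_unfold] using pvRescan_eq_foldl (r1 :: rest) r0
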